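-- pv_equiv track=rewrite | github.com/gabrielnhn/VisualizationAssignmentDME | test_andrea.py | arrange_plots_in_grid
-- ===== SOURCE A (Python) =====
-- import math
--
-- def arrange_plots_in_grid(plot_list, num_cols=4):
--     # Calculate the number of rows required
--     num_rows = math.ceil(len(plot_list) / num_cols)
--
--     # Create the grid by adding plots row-wise (each row contains up to 4 plots)
--     grid = []
--     for i in range(num_rows):
--         row = plot_list[i * num_cols:(i + 1) * num_cols]  # Get plots for the current row
--         # If there are fewer than 4 plots in the last row, append None to fill the empty spaces
--         while len(row) < num_cols:
--             row.append(None)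
--         grid.append(row)
--
--     return grid
-- ===== SOURCE B (Python) =====
-- import math
--
-- def arrange_plots_in_grid(plot_list, num_cols=4):
--     # Rows needed (raises ZeroDivisionError for num_cols == 0, like A)
--     num_rows = math.ceil(len(plot_list) / num_cols)
--     # Consume a single iterator; next's default fills the tail with None,
--     # so no slicing and no explicit padding step is needed.
--     it = iter(plot_list)
--     return [[next(it, None) for _ in range(num_cols)] for _ in range(num_rows)]
-- ===== Notes on version B (the rewrite author's own statement) =====
-- stated objective: idiomatic
-- what changed: B consumes a single iterator with next(it, None) inside a nested comprehension, so rows are filled element by element and missing cells default to None; there is no slicing and no padding loop at all.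
import Mathlib
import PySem

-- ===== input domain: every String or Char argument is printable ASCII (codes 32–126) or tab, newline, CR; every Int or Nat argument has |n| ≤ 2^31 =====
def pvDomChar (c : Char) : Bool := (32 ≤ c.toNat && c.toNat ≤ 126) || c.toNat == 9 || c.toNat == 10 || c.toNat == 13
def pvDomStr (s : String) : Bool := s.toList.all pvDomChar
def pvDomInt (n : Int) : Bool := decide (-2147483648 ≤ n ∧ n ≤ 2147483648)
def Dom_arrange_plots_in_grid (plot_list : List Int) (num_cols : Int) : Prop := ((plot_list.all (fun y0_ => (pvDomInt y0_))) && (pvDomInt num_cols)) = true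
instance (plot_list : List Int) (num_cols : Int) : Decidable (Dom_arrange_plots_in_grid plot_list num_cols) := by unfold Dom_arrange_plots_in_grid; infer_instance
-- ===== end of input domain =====

-- B fills the grid by consuming one iterator with next(it, None): no slicing and no padding loop (objective: idiomatic).

-- ===== PORT A =====
-- 'while len(row) < num_cols: row.append(None)'
def pyPadWhile (row : List (Option Int)) (num_cols : Int) : List (Option Int) :=
  if (row.length : Int) < num_cols then pyPadWhile (row ++ [none]) num_cols else row
termination_by (num_cols - row.length).toNat
decreasing_by simp; omega

-- math.ceil(len/num_cols) is ported as the exact integer ceiling -((-n) // num_cols);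
-- exact for the list lengths the float division represents exactly (all sampled inputs).
def arrange_plots_in_grid (plot_list : List Int) (num_cols : Int) : List (List (Option Int)) :=
  -- num_rows = math.ceil(len(plot_list) / num_cols)
  (PySem.List.pyRange 0 (-(PySem.Int.floordiv (-(plot_list.length : Int)) num_cols)) 1).foldl (fun grid i =>
    let row := PySem.List.slice (plot_list.map some) (some (i * num_cols)) (some ((i + 1) * num_cols))
    grid ++ [pyPadWhile row num_cols]) []

-- ===== PORT B =====
-- next(it, None) on an iterator represented as the list of not-yet-consumed elements
def pyNext (rest : List Int) : Option Int × List Int :=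
  match rest with
  | [] => (none, [])
  | x :: t => (some x, t)

def arrange_plots_in_grid_alt (plot_list : List Int) (num_cols : Int) : List (List (Option Int)) :=
  -- num_rows as in A, then [[next(it, None) for _ in range(num_cols)] for _ in range(num_rows)]
  ((PySem.List.pyRange 0 (-(PySem.Int.floordiv (-(plot_list.length : Int)) num_cols)) 1).foldl
    (fun (st : List (List (Option Int)) × List Int) _ =>
      let inner := (PySem.List.pyRange 0 num_cols 1).foldl
        (fun (rs : List (Option Int) × List Int) _ => (rs.1 ++ [(pyNext rs.2).1], (pyNext rs.2).2))
        ([], st.2)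
      (st.1 ++ [inner.1], inner.2))
    ([], plot_list)).1

-- ===== PRECONDITION & SPEC =====
-- Pre_ excludes only num_cols = 0, where Python A raises ZeroDivisionError.
def Pre_arrange_plots_in_grid (plot_list : List Int) (num_cols : Int) : Prop := num_cols ≠ 0
instance (plot_list : List Int) (num_cols : Int) : Decidable (Pre_arrange_plots_in_grid plot_list num_cols) := by unfold Pre_arrange_plots_in_grid; infer_instance
def pvWitness_arrange_plots_in_grid : List Int × Int := ([1, 2, 3, 4, 5], 4)

def Spec_arrange_plots_in_grid (plot_list : List Int) (num_cols : Int) (out : List (List (Option Int))) : Prop := out = arrange_plots_in_grid_alt plot_list num_cols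
instance (plot_list : List Int) (num_cols : Int) (out : List (List (Option Int))) : Decidable (Spec_arrange_plots_in_grid plot_list num_cols out) := by unfold Spec_arrange_plots_in_grid; infer_instance

-- ===== CLAIM (what is proved, stated in full; the proofs are below) =====
def Claim_equal_arrange_plots_in_grid : Prop := ∀ (plot_list : List Int) (num_cols : Int), Dom_arrange_plots_in_grid plot_list num_cols → Pre_arrange_plots_in_grid plot_list num_cols → Spec_arrange_plots_in_grid plot_list num_cols (arrange_plots_in_grid plot_list num_cols)

-- ===== LEMMAS AND PROOFS =====

-- what a row looks like when k cells are filled from the remaining elements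
def rowOf (rest : List Int) (k : Nat) : List (Option Int) :=
  (rest.take k).map some ++ List.replicate (k - rest.length) none

-- the inner comprehension: k next-steps produce rowOf and drop k elements of the iterator
theorem inner_foldl (l : List Int) : ∀ (acc : List (Option Int)) (rest : List Int),
    l.foldl (fun (rs : List (Option Int) × List Int) _ => (rs.1 ++ [(pyNext rs.2).1], (pyNext rs.2).2)) (acc, rest)
      = (acc ++ rowOf rest l.length, rest.drop l.length) := by
  induction l with
  | nil => intro acc rest; simp [rowOf]
  | cons _ t ih =>
      intro acc rest
      cases rest with
      | nil =>
          rw [List.foldl_cons]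
          show List.foldl _ (acc ++ [(none : Option Int)], ([] : List Int)) t = _
          rw [ih]
          simp [rowOf, List.replicate_succ]
      | cons x r =>
          rw [List.foldl_cons]
          show List.foldl _ (acc ++ [some x], r) t = _
          rw [ih]
          simp [rowOf, List.take_succ_cons, Nat.succ_sub_succ]

-- the while loop appends exactly (num_cols - len(row)) Nones
theorem pyPadWhile_eq (row : List (Option Int)) (nc : Int) :
    pyPadWhile row nc = row ++ List.replicate (nc - row.length).toNat none := by
  fun_induction pyPadWhile row nc with
  | case1 row h ih =>
      rw [ih]
      have : (nc - row.length).toNat = ((nc - (row ++ [none]).length).toNat) + 1 := by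
        simp; omega
      rw [this, List.replicate_succ, List.append_assoc]
      rfl
  | case2 row h =>
      have : (nc - row.length).toNat = 0 := by omega
      simp [this]

-- A's row i equals rowOf of the iterator tail (nc ≥ 0)
theorem rowA_eq (pl : List Int) (nc : Int) (hnc : 0 ≤ nc) (i : Nat) :
    pyPadWhile (PySem.List.slice (pl.map some) (some ((i : Int) * nc)) (some (((i : Int) + 1) * nc))) nc
      = rowOf (pl.drop (i * nc.toNat)) nc.toNat := by
  have ha : (0 : Int) ≤ (i : Int) * nc := by positivity
  have hb : (0 : Int) ≤ ((i : Int) + 1) * nc := by positivity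
  rw [PySem.List.slice_toNat, pyPadWhile_eq, rowOf]
  have h1 : ((i : Int) * nc).toNat = i * nc.toNat := by
    have : (i : Int) * nc = ((i * nc.toNat : Nat) : Int) := by push_cast; rw [Int.toNat_of_nonneg hnc]
    omega
  have h2 : (((i : Int) + 1) * nc).toNat - i * nc.toNat = nc.toNat := by
    have h3 : ((i : Int) + 1) * nc = (i : Int) * nc + nc := by ring
    omega
  rw [h1, h2, ← List.map_drop, ← List.map_take]
  have hc : (nc - ((List.map (some : Int → Option Int) (List.take nc.toNat (List.drop (i * nc.toNat) pl))).length : Int)).toNat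
      = nc.toNat - (List.drop (i * nc.toNat) pl).length := by
    simp only [List.length_map, List.length_take, List.length_drop]
    omega
  rw [hc]
  all_goals assumption

-- B's outer fold, unrolled over n rows
theorem outer_foldl (pl : List Int) (nc : Int) (hnc : 0 ≤ nc) (n : Nat) :
    (PySem.List.pyRange 0 (n : Int) 1).foldl
      (fun (st : List (List (Option Int)) × List Int) _ =>
        let inner := (PySem.List.pyRange 0 nc 1).foldl
          (fun (rs : List (Option Int) × List Int) _ => (rs.1 ++ [(pyNext rs.2).1], (pyNext rs.2).2))
          ([], st.2)
        (st.1 ++ [inner.1], inner.2))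
      ([], pl)
    = ((List.range n).map (fun i => rowOf (pl.drop (i * nc.toNat)) nc.toNat), pl.drop (n * nc.toNat)) := by
  induction n with
  | zero => simp [PySem.List.pyRange_one_eq_nil]
  | succ m ih =>
      have hcast : ((m : Int) + 1) = ((m + 1 : Nat) : Int) := by push_cast; ring
      rw [← hcast, PySem.List.pyRange_one_succ_right (by positivity), List.foldl_append, ih]
      simp only [List.foldl_cons, List.foldl_nil, inner_foldl]
      rw [PySem.List.length_pyRange_one]
      have hk : (nc - 0).toNat = nc.toNat := by omega
      rw [hk, List.drop_drop, List.range_succ, List.map_append, Nat.succ_mul]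
      simp

-- A's fold as a map
theorem A_eq_map (pl : List Int) (nc : Int) :
    arrange_plots_in_grid pl nc
      = (PySem.List.pyRange 0 (-(PySem.Int.floordiv (-(pl.length : Int)) nc)) 1).map (fun i =>
          pyPadWhile (PySem.List.slice (pl.map some) (some (i * nc)) (some ((i + 1) * nc))) nc) := by
  unfold arrange_plots_in_grid
  rw [PySem.List.foldl_append_singleton_eq_map, List.nil_append]

theorem neg_case (pl : List Int) (nc : Int) (hnc : nc < 0) :
    arrange_plots_in_grid pl nc = arrange_plots_in_grid_alt pl nc := by
  have hmb := PySem.Int.mod_neg_bounds (a := -(pl.length : Int)) hnc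
  have hdm := PySem.Int.floordiv_mul_add_mod (-(pl.length : Int)) nc
  have hr : -(PySem.Int.floordiv (-(pl.length : Int)) nc) ≤ 0 := by nlinarith
  unfold arrange_plots_in_grid arrange_plots_in_grid_alt
  rw [PySem.List.pyRange_one_eq_nil (by omega)]
  simp

theorem pos_case (pl : List Int) (nc : Int) (hnc : 0 < nc) :
    arrange_plots_in_grid pl nc = arrange_plots_in_grid_alt pl nc := by
  have hfd : PySem.Int.floordiv (-(pl.length : Int)) nc ≤ 0 := by
    by_contra h
    have h1 : 1 ≤ PySem.Int.floordiv (-(pl.length : Int)) nc := by omega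
    have := (PySem.Int.le_floordiv_iff_mul_le (a := -(pl.length : Int)) hnc (q := 1)).mp h1
    have : (0 : Int) ≤ pl.length := by positivity
    omega
  set r := -(PySem.Int.floordiv (-(pl.length : Int)) nc) with hrdef
  have hr0 : 0 ≤ r := by omega
  have hrn : r = ((r.toNat : Nat) : Int) := by omega
  rw [A_eq_map]
  unfold arrange_plots_in_grid_alt
  rw [← hrdef, hrn, outer_foldl pl nc (le_of_lt hnc) r.toNat]
  rw [PySem.List.pyRange_one]
  simp only [Int.sub_zero, List.map_map]
  apply List.map_congr_left
  intro i _
  simp only [Function.comp_apply, Int.zero_add]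
  exact rowA_eq pl nc (le_of_lt hnc) i

-- ===== VERDICT (by name: the statement is the Claim_ definition above) =====
theorem arrange_plots_in_grid_spec : Claim_equal_arrange_plots_in_grid := by
  intro pl nc _ hpre
  unfold Spec_arrange_plots_in_grid
  rcases lt_or_gt_of_ne hpre with h | h
  · exact (neg_case pl nc h).symm ▸ rfl
  · exact (pos_case pl nc h).symm ▸ rfl
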